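-- pv_equiv track=rewrite | github.com/abhishekir/CodingBat_Solutions | src/Array_2.py | more14
-- ===== SOURCE A (Python) =====
-- def more14(nums):
--     count = 0
--     for i in range(len(nums)):
--         if nums[i] == 1:
--             count -= 1
--         elif nums[i] == 4:
--             count += 1
--     return count < 0
-- ===== SOURCE B (Python) =====
-- def more14(nums):
--     s = sorted(x for x in nums if x == 1 or x == 4)
--     return len(s) > 0 and s[len(s) // 2] == 1
-- ===== Notes on version B (the rewrite author's own statement) =====
-- stated objective: alternative
-- what changed: Replaced the signed running-counter loop by a sort-and-median algorithm: filter out everything but 1s and 4s, sort, and test whether the middle element of the sorted list is 1 (the majority of the filtered list is 1 exactly when there are more 1s than 4s).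
import Mathlib
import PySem

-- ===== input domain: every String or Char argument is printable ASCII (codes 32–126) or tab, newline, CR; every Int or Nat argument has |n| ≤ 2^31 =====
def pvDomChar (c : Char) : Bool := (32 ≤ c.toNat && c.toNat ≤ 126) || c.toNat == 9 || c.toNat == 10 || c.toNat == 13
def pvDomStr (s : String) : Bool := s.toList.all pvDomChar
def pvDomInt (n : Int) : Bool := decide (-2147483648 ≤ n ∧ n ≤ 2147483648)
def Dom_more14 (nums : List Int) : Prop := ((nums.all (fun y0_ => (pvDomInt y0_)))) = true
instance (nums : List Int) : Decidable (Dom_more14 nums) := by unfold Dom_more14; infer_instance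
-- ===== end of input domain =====

-- B replaces A's signed running-counter loop by filter-sort-median: the sorted filtered list's middle element is 1 iff 1s outnumber 4s; objective: alternative.


-- ===== PORT A =====
def more14 (nums : List Int) : Bool :=
  let count : Int :=
    (PySem.List.pyRange 0 (nums.length : Int) 1).foldl
      (fun count i =>
        if PySem.List.pyGetD nums i 0 = 1 then count - 1
        else if PySem.List.pyGetD nums i 0 = 4 then count + 1
        else count) 0
  decide (count < 0)

-- ===== PORT B =====
def more14_alt (nums : List Int) : Bool :=
  let s := PySem.List.sorted (nums.filter (fun x => x == 1 || x == 4)) (fun x => x) false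
  decide (0 < s.length) && (PySem.List.pyGet? s (PySem.Int.floordiv (s.length : Int) 2) == some 1)

-- ===== PRECONDITION & SPEC =====
def Spec_more14 (nums : List Int) (out : Bool) : Prop := out = more14_alt nums
instance (nums : List Int) (out : Bool) : Decidable (Spec_more14 nums out) := by unfold Spec_more14; infer_instance

-- ===== CLAIM (what is proved, stated in full; the proofs are below) =====
def Claim_equal_more14 : Prop := ∀ (nums : List Int), Dom_more14 nums → Spec_more14 nums (more14 nums)

-- ===== LEMMAS AND PROOFS =====

-- A's loop computes (#4s) − (#1s)
lemma more14_loop (nums : List Int) (a : Int) :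
    nums.foldl (fun count x => if x = 1 then count - 1 else if x = 4 then count + 1 else count) a
      = a + (nums.count 4 : Int) - (nums.count 1 : Int) := by
  induction nums generalizing a with
  | nil => simp
  | cons x xs ih =>
    simp only [List.foldl_cons, List.count_cons, ih]
    split_ifs with h1 h4 <;> subst_vars <;> simp_all <;> ring

-- a list over {1,4} is a permutation of its 1s followed by its 4s
lemma perm_reps (l : List Int) (h : ∀ x ∈ l, x = 1 ∨ x = 4) :
    l.Perm (List.replicate (l.count 1) 1 ++ List.replicate (l.count 4) 4) := by
  induction l with
  | nil => simp
  | cons x xs ih =>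
    have ih' := ih (fun y hy => h y (List.mem_cons_of_mem _ hy))
    rcases h x (List.mem_cons_self ..) with rfl | rfl
    · simpa [List.count_cons, List.replicate_succ] using ih'.cons 1
    · have h2 : (4 :: xs).Perm
          (4 :: (List.replicate (xs.count 1) 1 ++ List.replicate (xs.count 4) 4)) := ih'.cons 4
      simp only [List.count_cons]
      norm_num
      exact h2.trans List.perm_middle.symm

lemma reps_pairwise (n1 n4 : Nat) :
    (List.replicate n1 (1:Int) ++ List.replicate n4 4).Pairwise (· ≤ ·) := by
  rw [List.pairwise_append]
  refine ⟨List.pairwise_replicate.2 (by simp), List.pairwise_replicate.2 (by simp), ?_⟩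
  intro a ha b hb
  rw [List.eq_of_mem_replicate ha, List.eq_of_mem_replicate hb]
  norm_num

-- ===== VERDICT (by name: the statement is the Claim_ definition above) =====
theorem more14_spec : Claim_equal_more14 := by
  intro nums _
  unfold Spec_more14 more14 more14_alt
  rw [PySem.List.foldl_pyRange_zero_pyGetD' (f := fun count x => if x = 1 then count - 1 else if x = 4 then count + 1 else count)]
  rw [more14_loop]
  set f := nums.filter (fun x => x == 1 || x == 4) with hf
  have hmem : ∀ x ∈ f, x = 1 ∨ x = 4 := by
    intro x hx
    have := List.of_mem_filter hx
    simpa using this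
  have hs : PySem.List.sorted f (fun x => x) false
      = List.replicate (f.count 1) 1 ++ List.replicate (f.count 4) 4 := by
    exact PySem.List.sorted_id_eq_of_perm_of_pairwise _ _ (perm_reps f hmem).symm (reps_pairwise _ _)
  have hc1 : f.count 1 = nums.count 1 := by simp [hf, List.count_filter]
  have hc4 : f.count 4 = nums.count 4 := by simp [hf, List.count_filter]
  simp only [hs, hc1, hc4]
  set n1 := nums.count 1
  set n4 := nums.count 4
  have hlen : (List.replicate n1 (1:Int) ++ List.replicate n4 4).length = n1 + n4 := by simp
  rw [hlen]
  rcases Nat.eq_zero_or_pos (n1 + n4) with h0 | hpos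
  · have h1 : n1 = 0 := by omega
    have h4 : n4 = 0 := by omega
    simp [h1, h4]
  · have hidx : PySem.Int.floordiv ((n1 + n4 : Nat) : Int) 2 = (((n1 + n4) / 2 : Nat) : Int) :=
      PySem.Int.floordiv_natCast _ _
    rw [hidx, PySem.List.pyGet?_natCast]
    have hlt : (n1 + n4) / 2 < n1 + n4 := by omega
    by_cases hm : (n1 + n4) / 2 < n1
    · have : (List.replicate n1 (1:Int) ++ List.replicate n4 4)[(n1 + n4) / 2]? = some 1 := by
        rw [List.getElem?_append_left (by simpa using hm)]
        simp [hm]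
      simp [this, hpos]
      omega
    · have hge : n1 ≤ (n1 + n4) / 2 := by omega
      have : (List.replicate n1 (1:Int) ++ List.replicate n4 4)[(n1 + n4) / 2]? = some 4 := by
        rw [List.getElem?_append_right (by simpa using hge)]
        simp [List.getElem?_replicate]
        omega
      simp [this, hpos]
      omega
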